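-- pv_equiv track=rewrite | github.com/mehdiatigui/othello-IA | utils.py | list_directions
-- ===== SOURCE A (Python) =====
-- directions = [
--     (0, -1),  # Up
--     (1, -1),  # Up-Right
--     (1, 0),  # Right
--     (1, 1),  # Down-Right
--     (0, 1),  # Down
--     (-1, 1),  # Down-Left
--     (-1, 0),  # Left
--     (-1, -1),  # Up-Left
-- ]
--
-- def is_inside(row, col):
--     '''
--     :param row: ligne
--     :param col: colonne
--     :return boolean: True si row et col sont à l'intérieur du board
--     '''
--     return 0 <= row < 8 and 0 <= col < 8
--
-- def get_coordinates(index):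
--     '''
--     :param index: l'index de la case (entre 0 et 63)
--     :return: les coordonnées à partir de l'index
--     '''
--     return index // 8, index % 8
--
-- def get_index(row, col):
--     '''
--     :param row: ligne
--     :param col: colonne
--     :return: l'index sur le board
--     '''
--     return row * 8 + col
--
-- def list_directions(index):
--     '''
--     :param index : nombre (compris entre 0 et 63)
--     :return: les listes directionnelles
--     '''
--     for dir in directions:
--         list = []
--         row, col = get_coordinates(index)
--         while is_inside(row, col):
--             row += dir[0]
--             col += dir[1]
--             list.append(get_index(row, col))
--         list.pop()
--         yield list
-- ===== SOURCE B (Python) =====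
-- directions = [
--     (0, -1), (1, -1), (1, 0), (1, 1),
--     (0, 1), (-1, 1), (-1, 0), (-1, -1),
-- ]
--
-- def list_directions(index):
--     row, col = index // 8, index % 8
--     for dr, dc in directions:
--         row_limit = 7 - row if dr > 0 else (row if dr < 0 else 7)
--         col_limit = 7 - col if dc > 0 else (col if dc < 0 else 7)
--         steps = min(row_limit, col_limit)
--         yield [(row + dr * k) * 8 + (col + dc * k) for k in range(1, steps + 1)]
-- ===== Notes on version B (the rewrite author's own statement) =====
-- stated objective: simpler
-- what changed: Replaces the per-direction walk-until-outside-then-pop loop with a closed-form count of in-bound steps (min of row/column limits) and a range comprehension.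
import Mathlib
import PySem

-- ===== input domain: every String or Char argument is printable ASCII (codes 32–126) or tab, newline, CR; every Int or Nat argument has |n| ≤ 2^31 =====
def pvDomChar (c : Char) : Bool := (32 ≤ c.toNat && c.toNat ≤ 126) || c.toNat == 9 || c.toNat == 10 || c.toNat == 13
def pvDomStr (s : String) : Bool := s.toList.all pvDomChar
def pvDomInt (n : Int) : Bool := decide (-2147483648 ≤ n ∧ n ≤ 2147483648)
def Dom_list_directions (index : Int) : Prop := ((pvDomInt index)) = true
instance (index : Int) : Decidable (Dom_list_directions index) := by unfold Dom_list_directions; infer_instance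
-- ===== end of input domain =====

-- B replaces A's walk-and-pop per direction by a closed-form step count and a
-- range comprehension (objective: simpler). A is a generator; equivalence is
-- about the list of yielded values.

-- ===== PORT A =====
def pvDirections : List (Int × Int) :=
  [(0, -1), (1, -1), (1, 0), (1, 1), (0, 1), (-1, 1), (-1, 0), (-1, -1)]

def pvIsInside (row col : Int) : Bool :=
  decide (0 ≤ row ∧ row < 8) && decide (0 ≤ col ∧ col < 8)

def pvGetCoordinates (index : Int) : Int × Int :=
  (PySem.Int.floordiv index 8, PySem.Int.mod index 8)

def pvGetIndex (row col : Int) : Int := row * 8 + col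

-- the while loop of A; fuel only makes it total (17 ≥ any possible iteration count inside Pre_)
def pvWhile (fuel : Nat) (dir : Int × Int) (row col : Int) (lst : List Int) : List Int :=
  match fuel with
  | 0 => lst
  | fuel + 1 =>
    if pvIsInside row col then
      pvWhile fuel dir (row + dir.1) (col + dir.2) (lst ++ [pvGetIndex (row + dir.1) (col + dir.2)])
    else lst

def list_directions (index : Int) : List (List Int) :=
  pvDirections.map (fun dir =>
    let rc := pvGetCoordinates index
    let lst := pvWhile 17 dir rc.1 rc.2 []
    -- list.pop(): Python raises IndexError on the empty list (outside Pre_); `.getD []` there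
    ((PySem.List.pop? lst (-1)).map Prod.snd).getD [])

-- ===== PORT B =====
def pvLimit (d pos : Int) : Int := if d > 0 then 7 - pos else if d < 0 then pos else 7

def list_directions_alt (index : Int) : List (List Int) :=
  let row := PySem.Int.floordiv index 8
  let col := PySem.Int.mod index 8
  pvDirections.map (fun d =>
    let steps := min (pvLimit d.1 row) (pvLimit d.2 col)
    (PySem.List.pyRange 1 (steps + 1) 1).map (fun k => (row + d.1 * k) * 8 + (col + d.2 * k)))

-- ===== PRECONDITION & SPEC =====
-- Pre_ excludes exactly the indices off the chessboard-sized board, where A's pop() of an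
-- empty list raises IndexError.
def Pre_list_directions (index : Int) : Prop := 0 ≤ index ∧ index < 64
instance (index : Int) : Decidable (Pre_list_directions index) := by
  unfold Pre_list_directions; infer_instance

def pvWitness_list_directions : Int := 27

def Spec_list_directions (index : Int) (out : List (List Int)) : Prop := out = list_directions_alt index
instance (index : Int) (out : List (List Int)) : Decidable (Spec_list_directions index out) := by unfold Spec_list_directions; infer_instance

-- ===== CLAIM (what is proved, stated in full; the proofs are below) =====
def Claim_equal_list_directions : Prop := ∀ (index : Int), Dom_list_directions index → Pre_list_directions index → Spec_list_directions index (list_directions index)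

-- ===== LEMMAS AND PROOFS =====

-- ===== VERDICT (by name: the statement is the Claim_ definition above) =====
theorem list_directions_spec : Claim_equal_list_directions := by
  intro index _ hpre
  unfold Spec_list_directions
  obtain ⟨h0, h1⟩ := hpre
  interval_cases index <;> decide
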